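-- pv_equiv track=rewrite | github.com/werelaxe/giveaway | ai.py | get_benefit
-- ===== SOURCE A (Python) =====
-- def get_benefit(player, start_stat, finish_stat):
--     benefit = 0
--     for index in range(4):
--         if index + 1 == player:
--             benefit += start_stat[index] - finish_stat[index]
--         else:
--             benefit -= start_stat[index] - finish_stat[index]
--     return benefit
-- ===== SOURCE B (Python) =====
-- def get_benefit(player, start_stat, finish_stat):
--     signs = [1 if i + 1 == player else -1 for i in range(4)]
--     def dot(signs, xs, ys):
--         if not signs:
--             return 0
--         return signs[0] * (xs[0] - ys[0]) + dot(signs[1:], xs[1:], ys[1:])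
--     return dot(signs, start_stat[:4], finish_stat[:4])
-- ===== Notes on version B (the rewrite author's own statement) =====
-- stated objective: alternative
-- what changed: Replaces the indexed branching accumulator loop by a staged formulation: first build a +/-1 sign table from the player comparison, then compute a recursive signed dot product of the sliced stat lists.
import Mathlib
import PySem

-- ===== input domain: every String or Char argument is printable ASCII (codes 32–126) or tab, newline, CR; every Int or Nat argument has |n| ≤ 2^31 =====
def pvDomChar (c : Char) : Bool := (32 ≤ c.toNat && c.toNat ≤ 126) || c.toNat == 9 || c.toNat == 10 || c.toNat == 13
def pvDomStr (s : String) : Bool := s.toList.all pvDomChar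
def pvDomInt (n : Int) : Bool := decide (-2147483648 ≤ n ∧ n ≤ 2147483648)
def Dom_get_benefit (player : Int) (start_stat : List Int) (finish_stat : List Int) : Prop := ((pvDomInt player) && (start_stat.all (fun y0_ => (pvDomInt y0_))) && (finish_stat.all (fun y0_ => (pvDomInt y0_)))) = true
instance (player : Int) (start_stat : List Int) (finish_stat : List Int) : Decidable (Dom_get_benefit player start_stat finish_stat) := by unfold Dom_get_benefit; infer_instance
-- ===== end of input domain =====

-- B builds a ±1 sign table from the player comparison and takes a recursive signed dot
-- product of the sliced stat lists, instead of A's indexed branching accumulator loop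
-- (objective: alternative decomposition, same cost).
-- ===== PORT A =====
-- loop `for index in range(4)` with the branch on `index + 1 == player`; indexing via
-- pyGetD (Pre_ guarantees the index is in range, so the default 0 is never taken)
def get_benefit (player : Int) (start_stat : List Int) (finish_stat : List Int) : Int :=
  (PySem.List.pyRange 0 4 1).foldl
    (fun benefit index =>
      if index + 1 == player then
        benefit + (PySem.List.pyGetD start_stat index 0 - PySem.List.pyGetD finish_stat index 0)
      else
        benefit - (PySem.List.pyGetD start_stat index 0 - PySem.List.pyGetD finish_stat index 0))
    0

-- ===== PORT B =====
-- recursive helper `dot`: structural recursion on the sign table; the Python indexes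
-- xs[0]/ys[0] and recurses on the [1:] slices, which on cons lists are head and tail;
-- the empty-xs/ys cases are unreachable under Pre_ (Python would raise IndexError there)
def pvDot : List Int → List Int → List Int → Int
  | [], _, _ => 0
  | _ :: _, [], _ => 0
  | _ :: _, _, [] => 0
  | s :: ss, x :: xs, y :: ys => s * (x - y) + pvDot ss xs ys

def get_benefit_alt (player : Int) (start_stat : List Int) (finish_stat : List Int) : Int :=
  let signs := (PySem.List.pyRange 0 4 1).map (fun i => if i + 1 == player then (1 : Int) else -1);
  pvDot signs (PySem.List.slice start_stat none (some 4)) (PySem.List.slice finish_stat none (some 4))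

-- ===== PRECONDITION & SPEC =====
-- Pre_: both lists have at least 4 elements — exactly the inputs where A's start_stat[index] /
-- finish_stat[index] (index in range(4)) do not raise IndexError.
def Pre_get_benefit (player : Int) (start_stat : List Int) (finish_stat : List Int) : Prop :=
  4 ≤ start_stat.length ∧ 4 ≤ finish_stat.length
instance (player : Int) (start_stat : List Int) (finish_stat : List Int) : Decidable (Pre_get_benefit player start_stat finish_stat) := by unfold Pre_get_benefit; infer_instance
def pvWitness_get_benefit : Int × List Int × List Int := (2, [1, 2, 3, 4], [4, 3, 2, 1])

def Spec_get_benefit (player : Int) (start_stat : List Int) (finish_stat : List Int) (out : Int) : Prop := out = get_benefit_alt player start_stat finish_stat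
instance (player : Int) (start_stat : List Int) (finish_stat : List Int) (out : Int) : Decidable (Spec_get_benefit player start_stat finish_stat out) := by unfold Spec_get_benefit; infer_instance

-- ===== CLAIM =====
def Claim_equal_get_benefit : Prop := ∀ (player : Int) (start_stat : List Int) (finish_stat : List Int), Dom_get_benefit player start_stat finish_stat → Pre_get_benefit player start_stat finish_stat → Spec_get_benefit player start_stat finish_stat (get_benefit player start_stat finish_stat)

-- ===== LEMMAS AND PROOFS =====

-- ===== VERDICT =====
theorem get_benefit_spec : Claim_equal_get_benefit := by
  intro player start_stat finish_stat _ hpre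
  obtain ⟨hs, hf⟩ := hpre
  match start_stat, finish_stat with
  | a0 :: a1 :: a2 :: a3 :: _, b0 :: b1 :: b2 :: b3 :: _ =>
    have hr : PySem.List.pyRange 0 4 1 = ([0,1,2,3] : List Int) := rfl
    simp only [Spec_get_benefit, get_benefit, get_benefit_alt, hr, List.map_cons, List.map_nil,
      List.foldl_cons, List.foldl_nil, PySem.List.slice, PySem.List.pyGetD_ofNat',
      List.getD, beq_iff_eq]
    norm_num [List.take, List.drop]
    split_ifs <;> simp [pvDot] <;> ring
  | [], _ | [_], _ | [_,_], _ | [_,_,_], _ => simp at hs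
  | _, [] | _, [_] | _, [_,_] | _, [_,_,_] => simp at hf
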